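-- pv_equiv track=rewrite | github.com/Sabyh/micrograd-neural-network-playbook | test.py | compute_broadcast_strides
-- ===== SOURCE A (Python) =====
-- from typing import Tuple, List, Optional, Union
--
-- def compute_broadcast_strides(original_shape: Tuple[int, ...],
--                             broadcast_shape: Tuple[int, ...],
--                             original_strides: Tuple[int, ...]) -> Tuple[int, ...]:
--     """
--     Compute strides for broadcasting without copying data
--     Key insight: When a dimension is size 1, set its stride to 0
--     """
--     # Pad original shape and strides to match broadcast shape
--     ndim_diff = len(broadcast_shape) - len(original_shape)
--     padded_shape = (1,) * ndim_diff + original_shape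
--     padded_strides = (0,) * ndim_diff + original_strides
--
--     broadcast_strides = []
--     for orig_size, broad_size, orig_stride in zip(padded_shape, broadcast_shape, padded_strides):
--         if orig_size == 1 and broad_size > 1:
--             # Broadcasting dimension: stride = 0 (reuse same element)
--             broadcast_strides.append(0)
--         else:
--             # Normal dimension: keep original stride
--             broadcast_strides.append(orig_stride)
--
--     return tuple(broadcast_strides)
-- ===== SOURCE B (Python) =====
-- def compute_broadcast_strides(original_shape, broadcast_shape, original_strides):
--     # Worklist loop: no padded tuples and no zip.  Reverse each input once so a
--     # dimension can be popped in O(1); while leading broadcast dims remain (the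
--     # countdown d) emit 0, then consume one dim from each worklist per step,
--     # stopping as soon as any runs out.
--     os = list(original_shape)[::-1]
--     bs = list(broadcast_shape)[::-1]
--     st = list(original_strides)[::-1]
--     d = max(len(bs) - len(os), 0)
--     out = []
--     while bs:
--         b = bs.pop()
--         if d > 0:
--             out.append(0)
--             d -= 1
--             continue
--         if not os or not st:
--             break
--         s, t = os.pop(), st.pop()
--         out.append(0 if s == 1 and b > 1 else t)
--     return tuple(out)
-- ===== Notes on version B (the rewrite author's own statement) =====
-- stated objective: alternative
-- what changed: B replaces A's pad-then-zip-then-append loop by a worklist loop: the inputs are reversed once and one dimension is popped per step, with a countdown for the leading broadcast dims, so no padded tuples and no zip are ever built.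
import Mathlib
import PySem

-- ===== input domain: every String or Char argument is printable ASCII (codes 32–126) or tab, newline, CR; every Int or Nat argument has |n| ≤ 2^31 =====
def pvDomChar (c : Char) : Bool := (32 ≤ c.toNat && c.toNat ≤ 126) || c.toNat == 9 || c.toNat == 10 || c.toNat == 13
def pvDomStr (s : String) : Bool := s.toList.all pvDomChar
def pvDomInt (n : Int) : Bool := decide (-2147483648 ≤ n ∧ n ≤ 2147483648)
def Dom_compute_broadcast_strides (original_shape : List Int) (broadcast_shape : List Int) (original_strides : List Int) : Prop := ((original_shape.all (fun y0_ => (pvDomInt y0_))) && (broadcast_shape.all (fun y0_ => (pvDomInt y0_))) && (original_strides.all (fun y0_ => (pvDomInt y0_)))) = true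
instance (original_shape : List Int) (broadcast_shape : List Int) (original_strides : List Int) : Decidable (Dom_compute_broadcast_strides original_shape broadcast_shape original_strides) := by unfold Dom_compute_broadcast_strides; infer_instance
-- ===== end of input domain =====

-- B replaces A's pad-then-zip-then-append loop by a worklist loop that pops one dimension
-- per step with a countdown for the leading broadcast dims (objective: alternative, same cost).

-- ===== PORT A =====
-- (1,)*ndim_diff in Python is empty for negative ndim_diff; Int.toNat clamps negatives to 0, which is exact here.
def compute_broadcast_strides (original_shape : List Int) (broadcast_shape : List Int) (original_strides : List Int) : List Int :=
  let ndim_diff : Int := (broadcast_shape.length : Int) - (original_shape.length : Int)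
  let padded_shape := List.replicate ndim_diff.toNat (1 : Int) ++ original_shape
  let padded_strides := List.replicate ndim_diff.toNat (0 : Int) ++ original_strides
  -- for orig_size, broad_size, orig_stride in zip(...): append 0 or orig_stride
  (List.zipWith3 (fun a b c => (a, b, c)) padded_shape broadcast_shape padded_strides).foldl
    (fun acc t => if t.1 = 1 ∧ 1 < t.2.1 then acc ++ [0] else acc ++ [t.2.2]) []

-- ===== PORT B =====
-- Source B's while-loop reverses each list once and pops from the back; popping the back of the
-- reversed list is consuming the head of the original list, so the loop is this structural
-- recursion on broadcast_shape with the countdown d for the leading broadcast dims.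
def goB (os : List Int) (bs : List Int) (st : List Int) (d : Nat) : List Int :=
  match bs, d with
  | [], _ => []
  | _ :: bt, Nat.succ n => 0 :: goB os bt st n
  | b :: bt, 0 =>
    match os, st with
    | s :: os2, t :: st2 => (if s = 1 ∧ 1 < b then (0 : Int) else t) :: goB os2 bt st2 0
    | _, _ => []

def compute_broadcast_strides_alt (original_shape : List Int) (broadcast_shape : List Int) (original_strides : List Int) : List Int :=
  -- max(len(bs)-len(os), 0): Nat subtraction truncates at 0, exact
  goB original_shape broadcast_shape original_strides (broadcast_shape.length - original_shape.length)

-- ===== PRECONDITION & SPEC =====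
def Spec_compute_broadcast_strides (original_shape : List Int) (broadcast_shape : List Int) (original_strides : List Int) (out : List Int) : Prop := out = compute_broadcast_strides_alt original_shape broadcast_shape original_strides
instance (original_shape : List Int) (broadcast_shape : List Int) (original_strides : List Int) (out : List Int) : Decidable (Spec_compute_broadcast_strides original_shape broadcast_shape original_strides out) := by unfold Spec_compute_broadcast_strides; infer_instance

-- ===== CLAIM (what is proved, stated in full; the proofs are below) =====
def Claim_equal_compute_broadcast_strides : Prop := ∀ (original_shape : List Int) (broadcast_shape : List Int) (original_strides : List Int), Dom_compute_broadcast_strides original_shape broadcast_shape original_strides → Spec_compute_broadcast_strides original_shape broadcast_shape original_strides (compute_broadcast_strides original_shape broadcast_shape original_strides)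

-- ===== LEMMAS AND PROOFS =====

-- A's append-in-a-loop equals mapping the branch over the zipped list
theorem foldl_branch_append (l : List (Int × Int × Int)) (init : List Int) :
    l.foldl (fun acc t => if t.1 = 1 ∧ 1 < t.2.1 then acc ++ [0] else acc ++ [t.2.2]) init
      = init ++ l.map (fun t => if t.1 = 1 ∧ 1 < t.2.1 then 0 else t.2.2) := by
  induction l generalizing init with
  | nil => simp
  | cons h t ih => simp only [List.foldl_cons, List.map_cons, ih]; split <;> simp

-- mapping over zip3-of-triples is zipWith3
theorem map_zip3 (f : Int → Int → Int → Int) (l1 l2 l3 : List Int) :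
    (List.zipWith3 (fun a b c => (a, b, c)) l1 l2 l3).map (fun t => f t.1 t.2.1 t.2.2)
      = List.zipWith3 f l1 l2 l3 := by
  induction l1 generalizing l2 l3 with
  | nil => simp [List.zipWith3]
  | cons a as ih =>
    cases l2 with
    | nil => simp [List.zipWith3]
    | cons b bs =>
      cases l3 with
      | nil => simp [List.zipWith3]
      | cons c cs => simp [List.zipWith3, ih]

-- the zipWith3 over A's padded lists is exactly B's recursion
theorem zipWith3_padded_eq_goB (os bs st : List Int) (d : Nat) :
    List.zipWith3 (fun a b c => if a = 1 ∧ 1 < b then (0 : Int) else c)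
        (List.replicate d 1 ++ os) bs (List.replicate d 0 ++ st)
      = goB os bs st d := by
  induction bs generalizing os st d with
  | nil => simp [goB, List.zipWith3]
  | cons b bt ih =>
    cases d with
    | succ n =>
      simp only [List.replicate_succ, List.cons_append, List.zipWith3, goB]
      rw [ih]
      congr 1
      split <;> rfl
    | zero =>
      cases os with
      | nil => simp [goB, List.zipWith3]
      | cons s os2 =>
        cases st with
        | nil => simp [goB, List.zipWith3]
        | cons t st2 =>
          simp only [List.replicate, List.nil_append, List.zipWith3, goB]
          rw [← ih os2 st2 0]
          simp

theorem compute_eq (os bs st : List Int) :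
    compute_broadcast_strides os bs st = compute_broadcast_strides_alt os bs st := by
  unfold compute_broadcast_strides compute_broadcast_strides_alt
  have hd : ((bs.length : Int) - (os.length : Int)).toNat = bs.length - os.length :=
    Int.toNat_sub _ _
  simp only [hd, foldl_branch_append, List.nil_append,
    map_zip3 (fun a b c => if a = 1 ∧ 1 < b then (0 : Int) else c)]
  exact zipWith3_padded_eq_goB os bs st _

-- ===== VERDICT (by name: the statement is the Claim_ definition above) =====
theorem compute_broadcast_strides_spec : Claim_equal_compute_broadcast_strides := by
  intro os bs st _
  unfold Spec_compute_broadcast_strides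
  exact compute_eq os bs st
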